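-- pv_equiv track=rewrite | github.com/lilyhuegerich/No-hop | dht_visualization/visual_keys.py | define_ports
-- ===== SOURCE A (Python) =====
-- def define_ports(connections, switches, host_ids):
--
--     used_ports_switch=[[]  for _ in range(len(switches))]
--     used_ports_host=[[] for _ in range(len(host_ids))]
--     connection_ports=[[0,0]  for _ in range(len(connections))]
--
--     for i, switch in enumerate(switches):
--         free_port=1
--         for c, connection in enumerate(connections):
--             if connection[0]==switch:
--                 used_ports_switch[i].append(free_port)
--                 connection_ports[c][0]=free_port
--                 free_port+=1
--             elif connection[1]==switch:
--                 used_ports_switch[i].append(free_port)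
--                 connection_ports[c][1]=free_port
--                 free_port+=1
--     for i, host in enumerate(host_ids):
--         free_port=1
--         for c, connection in enumerate(connections):
--             if connection[0]==host:
--                 used_ports_host[i].append(free_port)
--                 connection_ports[c][0]=free_port
--                 free_port+=1
--             elif connection[1]==host:
--                 used_ports_host[i].append(free_port)
--                 connection_ports[c][1]=free_port
--                 free_port+=1
--
--     return used_ports_host, used_ports_switch, connection_ports
-- ===== SOURCE B (Python) =====
-- def define_ports(connections, switches, host_ids):
--     # Single pass over connections with per-node next-free-port counters;
--     # each node's used-port list is just range(1, count+1).
--     nodes = set(switches) | set(host_ids)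
--     cnt = {}
--     connection_ports = []
--     for conn in connections:
--         a, b = conn[0], conn[1]
--         p0 = p1 = 0
--         if a in nodes:
--             p0 = cnt.get(a, 1)
--             cnt[a] = p0 + 1
--         if b in nodes and b != a:
--             p1 = cnt.get(b, 1)
--             cnt[b] = p1 + 1
--         connection_ports.append([p0, p1])
--     used_ports_switch = [list(range(1, cnt.get(s, 1))) for s in switches]
--     used_ports_host = [list(range(1, cnt.get(h, 1))) for h in host_ids]
--     return used_ports_host, used_ports_switch, connection_ports
-- ===== Notes on version B (the rewrite author's own statement) =====
-- stated objective: faster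
-- what changed: Instead of rescanning all connections once per switch and once per host, B makes a single pass over connections keeping a per-node next-free-port counter (dict), and derives each node's used-port list as range(1, count+1).
-- outside the precondition, e.g. on define_ports([[5]], [5], [5]): A returns ([[1]], [[1]], [[1, 0]]), B raises IndexError
import Mathlib
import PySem

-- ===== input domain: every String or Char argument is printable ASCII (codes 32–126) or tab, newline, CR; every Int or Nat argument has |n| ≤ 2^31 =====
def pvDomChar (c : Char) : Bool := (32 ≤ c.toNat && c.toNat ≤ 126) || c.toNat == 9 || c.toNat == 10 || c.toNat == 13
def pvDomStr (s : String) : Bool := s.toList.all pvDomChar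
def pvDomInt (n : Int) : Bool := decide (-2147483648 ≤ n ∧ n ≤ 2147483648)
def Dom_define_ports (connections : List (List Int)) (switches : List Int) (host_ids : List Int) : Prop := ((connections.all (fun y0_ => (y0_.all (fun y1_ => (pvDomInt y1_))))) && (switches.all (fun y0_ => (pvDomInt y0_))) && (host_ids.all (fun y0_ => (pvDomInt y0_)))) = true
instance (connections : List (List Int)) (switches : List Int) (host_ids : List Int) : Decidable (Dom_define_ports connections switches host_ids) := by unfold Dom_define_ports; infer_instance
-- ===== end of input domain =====

-- B replaces A's per-node rescans of the connection list by one pass with per-node counters (measurably faster on the timed inputs).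

-- ===== PORT A =====
-- conn[i]: total form of Python indexing; in-range under Pre_ (outside Pre_ Python raises IndexError)
def pvGet (conn : List Int) (i : Int) : Int := PySem.List.pyGetD conn i 0

-- inner 'for c, connection in enumerate(connections)' loop of A for one node: walks connections and the
-- connection_ports rows (same length, updated exactly at the running index) in lockstep, threading free_port
def pvScanA (node : Int) (conns cps : List (List Int)) (used : List Int) (free : Int) :
    List Int × List (List Int) :=
  match conns, cps with
  | conn :: rest, row :: rrest =>
      if pvGet conn 0 == node then
        let r := pvScanA node rest rrest (used ++ [free]) (free + 1)
        (r.1, row.set 0 free :: r.2)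
      else if pvGet conn 1 == node then
        let r := pvScanA node rest rrest (used ++ [free]) (free + 1)
        (r.1, row.set 1 free :: r.2)
      else
        let r := pvScanA node rest rrest used free
        (r.1, row :: r.2)
  | _, cps => (used, cps)

-- one of A's outer loops ('for i, switch in enumerate(switches)' / hosts): collects used-port lists, threads connection_ports
def pvLoopA (ns : List Int) (conns cps : List (List Int)) : List (List Int) × List (List Int) :=
  match ns with
  | [] => ([], cps)
  | n :: rest =>
      let r := pvScanA n conns cps [] 1
      let r2 := pvLoopA rest conns r.2
      (r.1 :: r2.1, r2.2)

def define_ports (connections : List (List Int)) (switches : List Int) (host_ids : List Int) :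
    List (List Int) × List (List Int) × List (List Int) :=
  let cp0 := connections.map (fun _ => ([0, 0] : List Int))
  let rs := pvLoopA switches connections cp0
  let rh := pvLoopA host_ids connections rs.2
  (rh.1, rs.1, rh.2)

-- ===== PORT B =====
-- body of B's single 'for conn in connections' loop: per-node next-free-port counters in a dict
def pvStepB (nodes : PySem.Set Int) (st : PySem.Dict Int Int × List (List Int)) (conn : List Int) :
    PySem.Dict Int Int × List (List Int) :=
  let a := pvGet conn 0
  let b := pvGet conn 1
  let p0 := if PySem.Set.contains nodes a then st.1.getD a 1 else 0
  let cnt1 := if PySem.Set.contains nodes a then st.1.insert a (p0 + 1) else st.1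
  let p1 := if PySem.Set.contains nodes b && !(b == a) then cnt1.getD b 1 else 0
  let cnt2 := if PySem.Set.contains nodes b && !(b == a) then cnt1.insert b (p1 + 1) else cnt1
  (cnt2, st.2 ++ [[p0, p1]])

def define_ports_alt (connections : List (List Int)) (switches : List Int) (host_ids : List Int) :
    List (List Int) × List (List Int) × List (List Int) :=
  let nodes : PySem.Set Int := PySem.Set.union (PySem.Set.ofList switches) (PySem.Set.ofList host_ids)
  let st := connections.foldl (pvStepB nodes) (PySem.Dict.empty, [])
  (host_ids.map (fun h => PySem.List.pyRange 1 (st.1.getD h 1) 1),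
   switches.map (fun s => PySem.List.pyRange 1 (st.1.getD s 1) 1),
   st.2)

-- ===== PRECONDITION & SPEC =====
-- Pre_ excludes inputs where some connection has fewer than two entries: there both Pythons raise IndexError,
-- except the accidental corner where every switch/host equals a short connection's sole entry, on which A still
-- returns but B raises (see cites).
def Pre_define_ports (connections : List (List Int)) (switches : List Int) (host_ids : List Int) : Prop :=
  ∀ conn ∈ connections, 2 ≤ conn.length
instance (connections : List (List Int)) (switches : List Int) (host_ids : List Int) : Decidable (Pre_define_ports connections switches host_ids) := by unfold Pre_define_ports; infer_instance

def pvWitness_define_ports : List (List Int) × List Int × List Int := ([[1, 2], [2, 3]], [1, 2], [3])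

def Spec_define_ports (connections : List (List Int)) (switches : List Int) (host_ids : List Int) (out : List (List Int) × List (List Int) × List (List Int)) : Prop := out = define_ports_alt connections switches host_ids
instance (connections : List (List Int)) (switches : List Int) (host_ids : List Int) (out : List (List Int) × List (List Int) × List (List Int)) : Decidable (Spec_define_ports connections switches host_ids out) := by unfold Spec_define_ports; infer_instance

-- ===== CLAIM (what is proved, stated in full; the proofs are below) =====
def Claim_equal_define_ports : Prop := ∀ (connections : List (List Int)) (switches : List Int) (host_ids : List Int), Dom_define_ports connections switches host_ids → Pre_define_ports connections switches host_ids → Spec_define_ports connections switches host_ids (define_ports connections switches host_ids)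

-- ===== LEMMAS AND PROOFS =====

-- a connection 'hits' a node exactly when A's inner loop consumes a port for that node on it
def pvHit (n : Int) (conn : List Int) : Bool := pvGet conn 0 == n || pvGet conn 1 == n

-- the connection_ports effect of one pvScanA pass, isolated
def pvUpd (n v : Int) : List (List Int) → List (List Int) → List (List Int)
  | conn :: rest, row :: rrest =>
      if pvGet conn 0 == n then row.set 0 v :: pvUpd n (v + 1) rest rrest
      else if pvGet conn 1 == n then row.set 1 v :: pvUpd n (v + 1) rest rrest
      else row :: pvUpd n v rest rrest
  | _, cps => cps

def pvHeadUpd (n v : Int) (conn row : List Int) : List Int :=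
  if pvGet conn 0 == n then row.set 0 v else if pvGet conn 1 == n then row.set 1 v else row

def pvApply (ns : List Int) (f : Int → Int) (conns cps : List (List Int)) : List (List Int) :=
  ns.foldl (fun r n => pvUpd n (f n) conns r) cps

def pvBump (f : Int → Int) (conn : List Int) : Int → Int :=
  fun n => if pvHit n conn then f n + 1 else f n

-- the common characterisation of the connection_ports result
def pvSpecCp (S : Int → Bool) (f : Int → Int) : List (List Int) → List (List Int)
  | [] => []
  | conn :: rest =>
      [if S (pvGet conn 0) then f (pvGet conn 0) else 0,
       if S (pvGet conn 1) && !(pvGet conn 1 == pvGet conn 0) then f (pvGet conn 1) else 0]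
      :: pvSpecCp S (pvBump f conn) rest

lemma pvUpd_length (n : Int) (conns : List (List Int)) :
    ∀ v cps, (pvUpd n v conns cps).length = cps.length := by
  induction conns with
  | nil => intro v cps; cases cps <;> rfl
  | cons conn rest ih =>
      intro v cps
      cases cps with
      | nil => rfl
      | cons row rrest => simp only [pvUpd]; split_ifs <;> simp [ih]

lemma pvApply_length (ns : List Int) (f : Int → Int) (conns : List (List Int)) :
    ∀ cps, (pvApply ns f conns cps).length = cps.length := by
  induction ns with
  | nil => intro cps; rfl
  | cons n rest ih => intro cps; simp only [pvApply, List.foldl_cons] at *; simp [ih, pvUpd_length]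

lemma scanA_snd (n : Int) (conns : List (List Int)) :
    ∀ cps used free, (pvScanA n conns cps used free).2 = pvUpd n free conns cps := by
  induction conns with
  | nil => intro cps used free; cases cps <;> rfl
  | cons conn rest ih =>
      intro cps used free
      cases cps with
      | nil => rfl
      | cons row rrest =>
          simp only [pvScanA, pvUpd]
          split_ifs <;> simp [ih]

lemma scanA_fst (n : Int) (conns : List (List Int)) :
    ∀ cps used free, conns.length ≤ cps.length →
      (pvScanA n conns cps used free).1
        = used ++ PySem.List.pyRange free (free + (conns.countP (pvHit n) : Int)) 1 := by
  induction conns with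
  | nil =>
      intro cps used free _
      cases cps <;> simp [pvScanA, PySem.List.pyRange_one_eq_nil]
  | cons conn rest ih =>
      intro cps used free hlen
      cases cps with
      | nil => simp at hlen
      | cons row rrest =>
          have hlen' : rest.length ≤ rrest.length := by simp at hlen; omega
          have hcast : (0 : Int) ≤ (rest.countP (pvHit n) : Int) := Int.natCast_nonneg _
          simp only [pvScanA]
          split_ifs with h1 h2
          · have hhit : pvHit n conn = true := by simp [pvHit, h1]
            rw [ih _ _ _ hlen']
            have hc : ((conn :: rest).countP (pvHit n) : Int) = (rest.countP (pvHit n) : Int) + 1 := by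
              rw [List.countP_cons, hhit]; simp
            rw [hc]
            conv_rhs => rw [PySem.List.pyRange_one_cons
              (show free < free + ((rest.countP (pvHit n) : Int) + 1) by omega)]
            have harith : free + 1 + (rest.countP (pvHit n) : Int)
                = free + ((rest.countP (pvHit n) : Int) + 1) := by ring
            rw [harith, List.append_assoc, List.singleton_append]
          · have hhit : pvHit n conn = true := by simp [pvHit, h2]
            rw [ih _ _ _ hlen']
            have hc : ((conn :: rest).countP (pvHit n) : Int) = (rest.countP (pvHit n) : Int) + 1 := by
              rw [List.countP_cons, hhit]; simp
            rw [hc]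
            conv_rhs => rw [PySem.List.pyRange_one_cons
              (show free < free + ((rest.countP (pvHit n) : Int) + 1) by omega)]
            have harith : free + 1 + (rest.countP (pvHit n) : Int)
                = free + ((rest.countP (pvHit n) : Int) + 1) := by ring
            rw [harith, List.append_assoc, List.singleton_append]
          ·
            have hhit : pvHit n conn = false := by simp [pvHit, h1, h2]
            rw [ih _ _ _ hlen', List.countP_cons, hhit]
            simp

lemma loopA_snd (ns : List Int) (conns : List (List Int)) :
    ∀ cps, (pvLoopA ns conns cps).2 = pvApply ns (fun _ => 1) conns cps := by
  induction ns with
  | nil => intro cps; rfl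
  | cons n rest ih => intro cps; simp [pvLoopA, pvApply, List.foldl_cons, ih, scanA_snd]

lemma loopA_fst (ns : List Int) (conns : List (List Int)) :
    ∀ cps, conns.length ≤ cps.length →
      (pvLoopA ns conns cps).1
        = ns.map (fun n => PySem.List.pyRange 1 (1 + (conns.countP (pvHit n) : Int)) 1) := by
  induction ns with
  | nil => intro cps _; rfl
  | cons n rest ih =>
      intro cps hlen
      have h2 : conns.length ≤ (pvScanA n conns cps [] 1).2.length := by
        rw [scanA_snd, pvUpd_length]; exact hlen
      simp [pvLoopA, ih _ h2, scanA_fst n conns cps [] 1 hlen]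

lemma pvUpd_cons (n v : Int) (conn row : List Int) (rest rrest : List (List Int)) :
    pvUpd n v (conn :: rest) (row :: rrest)
      = pvHeadUpd n v conn row :: pvUpd n (if pvHit n conn then v + 1 else v) rest rrest := by
  simp only [pvUpd, pvHeadUpd, pvHit]
  split_ifs with h1 h2 <;> simp_all

lemma pvApply_cons (ns : List Int) (conn row : List Int) (rest rrest : List (List Int)) :
    ∀ f, pvApply ns f (conn :: rest) (row :: rrest)
      = (ns.foldl (fun r m => pvHeadUpd m (f m) conn r) row) :: pvApply ns (pvBump f conn) rest rrest := by
  induction ns generalizing row rrest with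
  | nil => intro f; rfl
  | cons n ns ih =>
      intro f
      simp only [pvApply, List.foldl_cons] at *
      rw [pvUpd_cons, ih]
      rfl

lemma head_foldl (ns : List Int) (f : Int → Int) (conn : List Int) :
    ∀ x y : Int, ns.foldl (fun r m => pvHeadUpd m (f m) conn r) [x, y]
      = [if ns.contains (pvGet conn 0) then f (pvGet conn 0) else x,
         if ns.contains (pvGet conn 1) && !(pvGet conn 1 == pvGet conn 0) then f (pvGet conn 1) else y] := by
  induction ns with
  | nil => intro x y; simp
  | cons n ns ih =>
      intro x y
      simp only [List.foldl_cons]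
      by_cases ha : pvGet conn 0 = n
      · have hh : pvHeadUpd n (f n) conn [x, y] = [f n, y] := by
          simp [pvHeadUpd, ha]
        rw [hh, ih]
        subst ha
        by_cases hb : pvGet conn 1 = pvGet conn 0
        · simp [hb, List.contains_cons]
        · by_cases hbm : ns.contains (pvGet conn 1) <;>
            simp [hb, hbm, List.contains_cons]
      · by_cases hb : pvGet conn 1 = n
        · have hh : pvHeadUpd n (f n) conn [x, y] = [x, f n] := by
            simp [pvHeadUpd, ha, hb]
          rw [hh, ih]
          subst hb
          have hba : ¬ pvGet conn 1 = pvGet conn 0 := fun h => ha h.symm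
          by_cases ham : ns.contains (pvGet conn 0) <;>
          by_cases hbm : ns.contains (pvGet conn 1) <;>
            simp [ha, hba, ham, hbm, List.contains_cons]
        · have hh : pvHeadUpd n (f n) conn [x, y] = [x, y] := by
            simp [pvHeadUpd, ha, hb]
          rw [hh, ih]
          simp [List.contains_cons, ha, hb]

lemma pvApply_spec (ns : List Int) (conns : List (List Int)) :
    ∀ f, pvApply ns f conns (conns.map (fun _ => ([0, 0] : List Int)))
      = pvSpecCp (fun n => ns.contains n) f conns := by
  induction conns with
  | nil =>
      intro f
      simp only [List.map_nil, pvSpecCp, pvApply]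
      induction ns with
      | nil => rfl
      | cons n ns ihn => simpa only [List.foldl_cons] using ihn
  | cons conn rest ih =>
      intro f
      simp only [List.map_cons]
      rw [pvApply_cons, head_foldl, ih]
      rfl

-- B side: one pvStepB keeps 'counter value = f' on nodes and emits the pvSpecCp row
lemma stepB_snd (nodes : PySem.Set Int) (cnt : PySem.Dict Int Int) (acc : List (List Int))
    (conn : List Int) (f : Int → Int)
    (h : ∀ m, PySem.Set.contains nodes m = true → cnt.getD m 1 = f m) :
    (pvStepB nodes (cnt, acc) conn).2
      = acc ++ [[if PySem.Set.contains nodes (pvGet conn 0) then f (pvGet conn 0) else 0,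
                 if PySem.Set.contains nodes (pvGet conn 1) && !(pvGet conn 1 == pvGet conn 0)
                   then f (pvGet conn 1) else 0]] := by
  have h' : ∀ m, m ∈ nodes → cnt.getD m 1 = f m :=
    fun m hm => h m ((PySem.Set.contains_iff _ _).mpr hm)
  by_cases hba : pvGet conn 1 = pvGet conn 0
  · by_cases hSa : pvGet conn 0 ∈ nodes
    · simp [pvStepB, hSa, hba, h' _ hSa]
    · simp [pvStepB, hSa, hba]
  · by_cases hSa : pvGet conn 0 ∈ nodes <;> by_cases hSb : pvGet conn 1 ∈ nodes
    · simp [pvStepB, hSa, hSb, hba, PySem.Dict.getD_insert, h' _ hSa, h' _ hSb]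
    · simp [pvStepB, hSa, hSb, hba, h' _ hSa]
    · simp [pvStepB, hSa, hSb, hba, h' _ hSb]
    · simp [pvStepB, hSa, hSb, hba]

lemma stepB_fst (nodes : PySem.Set Int) (cnt : PySem.Dict Int Int) (acc : List (List Int))
    (conn : List Int) (f : Int → Int)
    (h : ∀ m, PySem.Set.contains nodes m = true → cnt.getD m 1 = f m) :
    ∀ n, PySem.Set.contains nodes n = true →
      (pvStepB nodes (cnt, acc) conn).1.getD n 1 = pvBump f conn n := by
  intro n hn0
  have hn : n ∈ nodes := (PySem.Set.contains_iff _ _).mp hn0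
  have h' : ∀ m, m ∈ nodes → cnt.getD m 1 = f m :=
    fun m hm => h m ((PySem.Set.contains_iff _ _).mpr hm)
  simp only [pvBump, pvHit]
  by_cases hna : pvGet conn 0 = n
  · subst hna
    by_cases hba : pvGet conn 1 = pvGet conn 0
    · simp [pvStepB, hn, hba, PySem.Dict.getD_insert, h' _ hn]
    · by_cases hSb : pvGet conn 1 ∈ nodes
      · have hab : ¬ pvGet conn 0 = pvGet conn 1 := fun hh => hba hh.symm
        simp [pvStepB, hn, hSb, hba, hab, PySem.Dict.getD_insert, h' _ hn]
      · simp [pvStepB, hn, hSb, hba, PySem.Dict.getD_insert, h' _ hn]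
  · by_cases hnb : pvGet conn 1 = n
    · subst hnb
      have hbna : ¬ pvGet conn 1 = pvGet conn 0 := fun hh => hna hh.symm
      by_cases hSa : pvGet conn 0 ∈ nodes
      · simp [pvStepB, hn, hSa, hbna, hna, PySem.Dict.getD_insert, h' _ hn]
      · simp [pvStepB, hn, hSa, hbna, hna, PySem.Dict.getD_insert, h' _ hn]
    · have hna' : ¬ n = pvGet conn 0 := fun hh => hna hh.symm
      have hnb' : ¬ n = pvGet conn 1 := fun hh => hnb hh.symm
      by_cases hSa : pvGet conn 0 ∈ nodes <;> by_cases hSb : pvGet conn 1 ∈ nodes <;>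
      by_cases hba : pvGet conn 1 = pvGet conn 0 <;>
        simp [pvStepB, hSa, hSb, hba, hna, hnb, hna', hnb', PySem.Dict.getD_insert, h' _ hn]

-- B side: the fold produces pvSpecCp rows and final counters 'f n + #hits'
lemma bfold_spec (nodes : PySem.Set Int) (conns : List (List Int)) :
    ∀ (cnt : PySem.Dict Int Int) (f : Int → Int) (acc : List (List Int)),
      (∀ n, PySem.Set.contains nodes n = true → cnt.getD n 1 = f n) →
      (conns.foldl (pvStepB nodes) (cnt, acc)).2
          = acc ++ pvSpecCp (fun n => PySem.Set.contains nodes n) f conns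
      ∧ ∀ n, PySem.Set.contains nodes n = true →
          (conns.foldl (pvStepB nodes) (cnt, acc)).1.getD n 1 = f n + (conns.countP (pvHit n) : Int) := by
  induction conns with
  | nil => intro cnt f acc h; simpa [pvSpecCp] using h
  | cons conn rest ih =>
      intro cnt f acc h
      rw [List.foldl_cons]
      obtain ⟨ih1, ih2⟩ := ih (pvStepB nodes (cnt, acc) conn).1 (pvBump f conn)
        (pvStepB nodes (cnt, acc) conn).2 (stepB_fst nodes cnt acc conn f h)
      rw [Prod.mk.eta] at ih1 ih2
      constructor
      · rw [ih1, stepB_snd nodes cnt acc conn f h]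
        simp [pvSpecCp, List.append_assoc]
      · intro n hn
        rw [ih2 n hn]
        rw [List.countP_cons]
        simp only [pvBump]
        by_cases hh : pvHit n conn = true <;> simp [hh] <;> push_cast <;> ring

lemma contains_union_ofList (sw ho : List Int) (n : Int) :
    PySem.Set.contains (PySem.Set.union (PySem.Set.ofList sw) (PySem.Set.ofList ho)) n
      = (sw ++ ho).contains n := by
  have hmem : n ∈ PySem.Set.union (PySem.Set.ofList sw) (PySem.Set.ofList ho) ↔ n ∈ sw ++ ho := by
    rw [PySem.Set.mem_union, PySem.Set.mem_ofList, PySem.Set.mem_ofList, List.mem_append]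
  by_cases h : n ∈ sw ++ ho
  · rw [(PySem.Set.contains_iff _ _).mpr (hmem.mpr h), List.contains_iff_mem.mpr h]
  · have h1 : PySem.Set.contains (PySem.Set.union (PySem.Set.ofList sw) (PySem.Set.ofList ho)) n = false := by
      by_contra hc
      exact (hmem.mp ((PySem.Set.contains_iff _ _).mp (Bool.of_not_eq_false hc))) |> h
    have h2 : (sw ++ ho).contains n = false := by
      by_contra hc
      exact h (List.contains_iff_mem.mp (Bool.of_not_eq_false hc))
    rw [h1, h2]

-- ===== VERDICT (by name: the statement is the Claim_ definition above) =====
theorem define_ports_spec : Claim_equal_define_ports := by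
  intro conns sw ho _ _
  unfold Spec_define_ports define_ports define_ports_alt
  set nodes : PySem.Set Int := PySem.Set.union (PySem.Set.ofList sw) (PySem.Set.ofList ho) with hnodes
  obtain ⟨hcp, hcnt⟩ := bfold_spec nodes conns PySem.Dict.empty (fun _ => 1) []
    (by intro n _; simp [PySem.Dict.getD_empty])
  have hS : (fun n => PySem.Set.contains nodes n) = (fun n => (sw ++ ho).contains n) := by
    funext n; rw [hnodes]; exact contains_union_ofList sw ho n
  have hlen0 : conns.length ≤ (conns.map (fun _ => ([0, 0] : List Int))).length := by simp
  have hlen1 : conns.length ≤ (pvLoopA sw conns (conns.map (fun _ => ([0, 0] : List Int)))).2.length := by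
    rw [loopA_snd, pvApply_length]; exact hlen0
  refine Prod.ext ?_ (Prod.ext ?_ ?_)
  · -- used_ports_host
    simp only [loopA_fst ho conns _ hlen1]
    apply List.map_congr_left
    intro n hn
    have hmem : PySem.Set.contains nodes n = true :=
      (PySem.Set.contains_iff _ _).mpr ((PySem.Set.mem_union _ _ _).mpr
        (Or.inr ((PySem.Set.mem_ofList _ _).mpr hn)))
    rw [hcnt n hmem]
  · -- used_ports_switch
    simp only [loopA_fst sw conns _ hlen0]
    apply List.map_congr_left
    intro n hn
    have hmem : PySem.Set.contains nodes n = true :=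
      (PySem.Set.contains_iff _ _).mpr ((PySem.Set.mem_union _ _ _).mpr
        (Or.inl ((PySem.Set.mem_ofList _ _).mpr hn)))
    rw [hcnt n hmem]
  · -- connection_ports
    simp only [loopA_snd]
    have happ : pvApply ho (fun _ => 1) conns
        (pvApply sw (fun _ => 1) conns (conns.map (fun _ => ([0, 0] : List Int))))
        = pvApply (sw ++ ho) (fun _ => 1) conns (conns.map (fun _ => ([0, 0] : List Int))) := by
      simp [pvApply, List.foldl_append]
    rw [happ, pvApply_spec]
    rw [hcp]
    rw [hS]
    simp
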